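-- pv_equiv track=rewrite | github.com/NicolasPires777/ZaIA | main-classifier.py | estabilizar_classes
-- ===== SOURCE A (Python) =====
-- def estabilizar_classes(classes, min_consecutive=3):
--     """
--     Só troca de classe se a nova classe aparecer
--     em min_consecutive frames consecutivos
--     """
--     if not classes:
--         return []
--
--     classe_atual = classes[0]
--     classes_estaveis = [classe_atual]
--
--     contagem = 0
--     candidata = None
--
--     for c in classes[1:]:
--         if c == classe_atual:
--             # Continua igual → zera candidato
--             contagem = 0
--             candidata = None
--             classes_estaveis.append(classe_atual)
--         else:
--             # Possível troca
--             if candidata is None or c != candidata: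
--                 candidata = c
--                 contagem = 1
--             else:
--                 contagem += 1
--
--             if contagem >= min_consecutive:
--                 # Confirma troca
--                 classe_atual = candidata
--                 contagem = 0
--                 candidata = None
--
--             classes_estaveis.append(classe_atual)
--
--     return classes_estaveis
-- ===== SOURCE B (Python) =====
-- def estabilizar_classes(classes, min_consecutive=3):
--     """Run-length decomposition: split into maximal runs, then decide per run
--     whether the stable class switches (run length reaches the threshold)."""
--     if not classes:
--         return []
--     # run-length encode
--     runs = []
--     for c in classes:
--         if runs and runs[-1][0] == c:
--             runs[-1][1] += 1
--         else:
--             runs.append([c, 1])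
--     t = max(1, min_consecutive)
--     v0, L0 = runs[0]
--     out = [v0] * L0
--     current = v0
--     for value, L in runs[1:]:
--         if L >= t:
--             out += [current] * (t - 1) + [value] * (L - t + 1)
--             current = value
--         else:
--             out += [current] * L
--     return out
-- ===== Notes on version B (the rewrite author's own statement) =====
-- stated objective: alternative
-- what changed: B first run-length encodes the input into maximal (value, length) runs and then decides per run, using only the current stable class, how many elements keep the old class and whether the run's length reaches the switching threshold max(1, min_consecutive), instead of A's per-element loop with a counter and a candidate variable.
import Mathlib
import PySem

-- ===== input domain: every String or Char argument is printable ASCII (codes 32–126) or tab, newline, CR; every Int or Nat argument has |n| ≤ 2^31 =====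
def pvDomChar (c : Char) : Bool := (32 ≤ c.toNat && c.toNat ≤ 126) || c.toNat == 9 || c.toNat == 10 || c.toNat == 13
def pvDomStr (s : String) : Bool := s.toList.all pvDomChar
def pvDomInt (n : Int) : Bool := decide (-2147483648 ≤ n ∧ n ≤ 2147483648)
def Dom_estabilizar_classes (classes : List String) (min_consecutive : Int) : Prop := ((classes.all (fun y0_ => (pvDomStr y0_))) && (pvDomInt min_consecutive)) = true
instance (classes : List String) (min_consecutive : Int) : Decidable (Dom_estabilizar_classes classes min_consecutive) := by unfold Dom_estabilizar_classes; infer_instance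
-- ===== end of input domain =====

-- B re-implements A by run-length encoding the input and deciding per run; same O(n) cost, different decomposition.

-- ===== PORT A =====
-- A's loop state: (classe_atual, classes_estaveis, contagem, candidata).
-- `cand2.getD cur` ports `classe_atual = candidata`: at that point candidata is never None (cand2 is always `some _`).
def pvAStep (m : Int) (st : String × List String × Int × Option String) (c : String) :
    String × List String × Int × Option String :=
  let (cur, acc, cont, cand) := st
  if c = cur then
    (cur, acc ++ [cur], 0, none)
  else
    let (cand2, cont2) := if cand = none ∨ ¬ (some c = cand) then (some c, (1 : Int)) else (cand, cont + 1)
    if cont2 ≥ m then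
      let cur2 := cand2.getD cur
      (cur2, acc ++ [cur2], 0, none)
    else
      (cur, acc ++ [cur], cont2, cand2)

def estabilizar_classes (classes : List String) (min_consecutive : Int) : List String :=
  match classes with
  | [] => []
  | c0 :: resto =>
    (resto.foldl (pvAStep min_consecutive) (c0, [c0], 0, none)).2.1

-- ===== PORT B =====
-- run-length encoding of Source B's `runs` loop (maximal runs, front first)
def pvRunsOf : List String → List (String × Nat)
  | [] => []
  | c :: rest =>
    let p := rest.span (fun x => x = c)
    (c, 1 + p.1.length) :: pvRunsOf p.2
termination_by l => l.length
decreasing_by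
  simp only [List.span_eq_takeWhile_dropWhile, List.length_cons]
  exact Nat.lt_succ_of_le (List.length_dropWhile_le _ _)

-- Source B's per-run loop body with state (out, current)
def pvBStep (t : Int) (st : List String × String) (vk : String × Nat) : List String × String :=
  let (out, cur) := st
  let (value, L) := vk
  if (L : Int) ≥ t then
    (out ++ List.replicate (t - 1).toNat cur ++ List.replicate (L - (t - 1).toNat) value, value)
  else
    (out ++ List.replicate L cur, cur)

def estabilizar_classes_alt (classes : List String) (min_consecutive : Int) : List String :=
  match pvRunsOf classes with
  | [] => []
  | (v0, L0) :: rest =>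
    let t := max 1 min_consecutive
    (rest.foldl (pvBStep t) (List.replicate L0 v0, v0)).1

-- ===== PRECONDITION & SPEC =====
def Spec_estabilizar_classes (classes : List String) (min_consecutive : Int) (out : List String) : Prop := out = estabilizar_classes_alt classes min_consecutive
instance (classes : List String) (min_consecutive : Int) (out : List String) : Decidable (Spec_estabilizar_classes classes min_consecutive out) := by unfold Spec_estabilizar_classes; infer_instance

-- ===== CLAIM (what is proved, stated in full; the proofs are below) =====
def Claim_equal_estabilizar_classes : Prop := ∀ (classes : List String) (min_consecutive : Int), Dom_estabilizar_classes classes min_consecutive → Spec_estabilizar_classes classes min_consecutive (estabilizar_classes classes min_consecutive)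

-- ===== LEMMAS AND PROOFS =====

-- folding A's step over a run equal to the current class, from a clean state
theorem pvA_eq_clean (m : Int) (j : Nat) : ∀ (cur : String) (acc : List String),
    List.foldl (pvAStep m) (cur, acc, 0, none) (List.replicate j cur) =
      (cur, acc ++ List.replicate j cur, 0, none) := by
  induction j with
  | zero => intro cur acc; simp
  | succ j ih =>
    intro cur acc
    rw [List.replicate_succ, List.foldl_cons]
    have h1 : pvAStep m (cur, acc, 0, none) cur = (cur, acc ++ [cur], 0, none) := by
      simp [pvAStep]
    rw [h1, ih]
    simp

-- same, from an arbitrary state, for a nonempty run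
theorem pvA_eq_run (m : Int) (j : Nat) (cur : String) (acc : List String) (cont : Int)
    (cand : Option String) :
    List.foldl (pvAStep m) (cur, acc, cont, cand) (List.replicate (j + 1) cur) =
      (cur, acc ++ List.replicate (j + 1) cur, 0, none) := by
  rw [List.replicate_succ, List.foldl_cons]
  have h1 : pvAStep m (cur, acc, cont, cand) cur = (cur, acc ++ [cur], 0, none) := by
    simp [pvAStep]
  rw [h1, pvA_eq_clean]
  simp

-- counting up inside a differing run that does not reach the threshold
theorem pvA_count (m : Int) (c cur : String) (hne : c ≠ cur) :
    ∀ (j : Nat) (i : Int) (acc : List String), 1 ≤ i → i + j < m →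
    List.foldl (pvAStep m) (cur, acc, i, some c) (List.replicate j c) =
      (cur, acc ++ List.replicate j cur, i + j, some c) := by
  intro j
  induction j with
  | zero => intro i acc _ _; simp
  | succ j ih =>
    intro i acc hi hlt
    rw [List.replicate_succ, List.foldl_cons]
    have hstep : pvAStep m (cur, acc, i, some c) c = (cur, acc ++ [cur], i + 1, some c) := by
      have hm : ¬ (i + 1 ≥ m) := by push_cast at hlt; omega
      simp [pvAStep, hne, hm]
    rw [hstep, ih (i + 1) (acc ++ [cur]) (by omega) (by push_cast at hlt ⊢; omega)]
    have hl : acc ++ [cur] ++ List.replicate j cur = acc ++ List.replicate (j + 1) cur := by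
      simp [List.replicate_succ]
    have hi2 : i + 1 + (j : Int) = i + ((j + 1 : Nat) : Int) := by push_cast; ring
    rw [hl, hi2]

-- full differing run from a state whose candidate is not this run's value
theorem pvA_diff (m : Int) (c cur : String) (hne : c ≠ cur) (j : Nat) :
    ∀ (acc : List String) (cont : Int) (cand : Option String), cand ≠ some c →
    List.foldl (pvAStep m) (cur, acc, cont, cand) (List.replicate (j + 1) c) =
      (if ((j + 1 : Nat) : Int) ≥ max 1 m then
        (c, acc ++ List.replicate (max 1 m - 1).toNat cur ++
            List.replicate ((j + 1) - (max 1 m - 1).toNat) c, 0, none)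
      else
        (cur, acc ++ List.replicate (j + 1) cur, ((j + 1 : Nat) : Int), some c)) := by
  intro acc cont cand hcand
  rw [List.replicate_succ, List.foldl_cons]
  have hstep1 : pvAStep m (cur, acc, cont, cand) c =
      (if (1 : Int) ≥ m then (c, acc ++ [c], 0, none) else (cur, acc ++ [cur], 1, some c)) := by
    simp only [pvAStep]
    rw [if_neg hne]
    have hsel : (if cand = none ∨ ¬ (some c = cand) then (some c, (1 : Int)) else (cand, cont + 1)) = (some c, (1 : Int)) := by
      rw [if_pos]
      right
      intro h; exact hcand h.symm
    rw [hsel]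
    by_cases h1 : (1 : Int) ≥ m
    · rw [if_pos h1, if_pos h1]; rfl
    · rw [if_neg h1, if_neg h1]
  by_cases h1 : (1 : Int) ≥ m
  · -- threshold is 1: immediate switch, rest of run is the equal case
    rw [hstep1, if_pos h1, pvA_eq_clean]
    have ht : max 1 m = 1 := by omega
    rw [if_pos (by push_cast; omega)]
    simp [ht, List.replicate_succ]
  · -- m ≥ 2, so max 1 m = m
    have hm2 : 2 ≤ m := by omega
    have ht : max 1 m = m := by omega
    rw [hstep1, if_neg h1]
    by_cases hk : ((j + 1 : Nat) : Int) ≥ m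
    · -- run reaches the threshold: count to m-1, switch, then equal tail
      set q := m.toNat with hq
      have hqm : (q : Int) = m := by omega
      have hjq : q - 2 + (1 + (j - (q - 1))) = j := by omega
      have hsplit : List.replicate j c =
          List.replicate (q - 2) c ++ (c :: List.replicate (j - (q - 1)) c) := by
        rw [← List.replicate_succ, ← List.replicate_add]
        congr 1
        omega
      rw [hsplit, List.foldl_append,
        pvA_count m c cur hne (q - 2) 1 (acc ++ [cur]) (by omega) (by omega)]
      rw [List.foldl_cons]
      have hstep2 : pvAStep m (cur, acc ++ [cur] ++ List.replicate (q - 2) cur, 1 + ((q - 2 : Nat) : Int), some c)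
          c = (c, (acc ++ [cur] ++ List.replicate (q - 2) cur) ++ [c], 0, none) := by
        have hge2 : 1 + ((q - 2 : Nat) : Int) + 1 ≥ m := by omega
        simp [pvAStep, hne, hge2]
      rw [hstep2, pvA_eq_clean]
      rw [ht, if_pos hk]
      have h1 : List.replicate (m - 1).toNat cur = cur :: List.replicate (q - 2) cur := by
        rw [← List.replicate_succ]; congr 1; omega
      have h2 : List.replicate ((j + 1) - (m - 1).toNat) c = c :: List.replicate (j - (q - 1)) c := by
        rw [← List.replicate_succ]; congr 1; omega
      rw [h1, h2]
      simp
    · -- run stays below the threshold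
      rw [pvA_count m c cur hne j 1 (acc ++ [cur]) (by omega) (by push_cast at hk ⊢; omega)]
      rw [if_neg (by rw [ht]; exact hk)]
      have hl : acc ++ [cur] ++ List.replicate j cur = acc ++ List.replicate (j + 1) cur := by
        simp [List.replicate_succ]
      have hi2 : 1 + (j : Int) = ((j + 1 : Nat) : Int) := by push_cast; ring
      rw [hl, hi2]

-- the key invariant: from a clean-enough state, A's fold over l equals B's fold over the runs of l
theorem pvKey (m : Int) : ∀ (n : Nat) (l : List String), l.length ≤ n →
    ∀ (cur : String) (acc : List String) (cont : Int) (cand : Option String),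
    (∀ x xs, l = x :: xs → cand ≠ some x) →
    (List.foldl (pvAStep m) (cur, acc, cont, cand) l).2.1 =
      (List.foldl (pvBStep (max 1 m)) (acc, cur) (pvRunsOf l)).1 := by
  intro n
  induction n with
  | zero =>
    intro l hl cur acc cont cand _
    have : l = [] := List.eq_nil_of_length_eq_zero (Nat.le_zero.mp hl)
    subst this
    simp [pvRunsOf]
  | succ n ih =>
    intro l hl cur acc cont cand hcand
    match l with
    | [] => simp [pvRunsOf]
    | c :: rest =>
      have hspan := List.span_eq_takeWhile_dropWhile (fun x => decide (x = c)) rest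
      have htake : rest.takeWhile (fun x => decide (x = c)) =
          List.replicate (rest.takeWhile (fun x => decide (x = c))).length c := by
        apply List.eq_replicate_of_mem
        intro b hb
        have := List.mem_takeWhile_imp hb
        simpa using this
      set k := (rest.takeWhile (fun x => decide (x = c))).length with hk
      set rest' := rest.dropWhile (fun x => decide (x = c)) with hrest'
      have hdecomp : (c :: rest) = List.replicate (k + 1) c ++ rest' := by
        rw [List.replicate_succ, List.cons_append]
        congr 1
        rw [← htake]
        exact List.takeWhile_append_dropWhile.symm
      have hruns : pvRunsOf (c :: rest) = (c, 1 + k) :: pvRunsOf rest' := by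
        rw [pvRunsOf]
        rw [hspan]
      have hlen' : rest'.length ≤ n := by
        have h1 := List.length_dropWhile_le (fun x => decide (x = c)) rest
        rw [← hrest'] at h1
        simp at hl
        omega
      have hhead' : ∀ x xs, rest' = x :: xs → x ≠ c := by
        intro x xs hx
        have := List.head?_dropWhile_not (fun x => decide (x = c)) rest
        rw [← hrest', hx] at this
        simpa using this
      rw [hruns, show (c :: rest) = List.replicate (k + 1) c ++ rest' from hdecomp,
        List.foldl_append, List.foldl_cons]
      by_cases hc : c = cur
      · -- a run equal to the current class: both sides append k+1 copies of it
        subst hc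
        rw [pvA_eq_run]
        have hb : pvBStep (max 1 m) (acc, c) (c, 1 + k) =
            (acc ++ List.replicate (k + 1) c, c) := by
          simp only [pvBStep]
          by_cases hge : ((1 + k : Nat) : Int) ≥ max 1 m
          · have hl2 : acc ++ List.replicate (max 1 m - 1).toNat c ++
                List.replicate (1 + k - (max 1 m - 1).toNat) c =
                acc ++ List.replicate (k + 1) c := by
              rw [List.append_assoc, ← List.replicate_add]
              congr 2
              omega
            rw [if_pos hge, hl2]
          · have hl2 : acc ++ List.replicate (1 + k) c = acc ++ List.replicate (k + 1) c := by
              congr 2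
              omega
            rw [if_neg hge, hl2]
        rw [hb]
        exact ih rest' hlen' c (acc ++ List.replicate (k + 1) c) 0 none
          (by intro x xs _; simp)
      · -- a differing run
        have hcand' : cand ≠ some c := hcand c rest rfl
        rw [pvA_diff m c cur hc k acc cont cand hcand']
        by_cases hge : ((k + 1 : Nat) : Int) ≥ max 1 m
        · rw [if_pos hge]
          have hb : pvBStep (max 1 m) (acc, cur) (c, 1 + k) =
              (acc ++ List.replicate (max 1 m - 1).toNat cur ++
                List.replicate ((k + 1) - (max 1 m - 1).toNat) c, c) := by
            simp only [pvBStep]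
            rw [if_pos (by push_cast at hge ⊢; omega)]
            have hl2 : List.replicate (1 + k - (max 1 m - 1).toNat) c =
                List.replicate ((k + 1) - (max 1 m - 1).toNat) c := by
              congr 1
              omega
            rw [hl2]
          rw [hb]
          exact ih rest' hlen' c _ 0 none (by intro x xs _; simp)
        · rw [if_neg hge]
          have hb : pvBStep (max 1 m) (acc, cur) (c, 1 + k) =
              (acc ++ List.replicate (k + 1) cur, cur) := by
            simp only [pvBStep]
            rw [if_neg (by push_cast at hge ⊢; omega)]
            have hl2 : List.replicate (1 + k) cur = List.replicate (k + 1) cur := by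
              congr 1
              omega
            rw [hl2]
          rw [hb]
          exact ih rest' hlen' cur (acc ++ List.replicate (k + 1) cur) ((k + 1 : Nat) : Int)
            (some c) (by intro x xs hx h; exact hhead' x xs hx (by injection h with h2; exact h2.symm ▸ rfl))

-- ===== VERDICT (by name: the statement is the Claim_ definition above) =====
theorem estabilizar_classes_spec : Claim_equal_estabilizar_classes := by
  intro classes m _
  unfold Spec_estabilizar_classes
  match classes with
  | [] => simp [estabilizar_classes, estabilizar_classes_alt, pvRunsOf]
  | c0 :: resto =>
    unfold estabilizar_classes estabilizar_classes_alt
    rw [pvRunsOf]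
    have hspan := List.span_eq_takeWhile_dropWhile (fun x => decide (x = c0)) resto
    rw [hspan]
    have htake : resto.takeWhile (fun x => decide (x = c0)) =
        List.replicate (resto.takeWhile (fun x => decide (x = c0))).length c0 := by
      apply List.eq_replicate_of_mem
      intro b hb
      have := List.mem_takeWhile_imp hb
      simpa using this
    set k := (resto.takeWhile (fun x => decide (x = c0))).length with hk
    set rest' := resto.dropWhile (fun x => decide (x = c0)) with hrest'
    have hdecomp : resto = List.replicate k c0 ++ rest' := by
      rw [← htake]; exact (List.takeWhile_append_dropWhile).symm
    have hhead' : ∀ x xs, rest' = x :: xs → x ≠ c0 := by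
      intro x xs hx
      have := List.head?_dropWhile_not (fun x => decide (x = c0)) resto
      rw [← hrest', hx] at this
      simpa using this
    simp only
    rw [show resto = List.replicate k c0 ++ rest' from hdecomp, List.foldl_append, pvA_eq_clean]
    rw [pvKey m rest'.length rest' le_rfl c0 ([c0] ++ List.replicate k c0) 0 none
      (by intro x xs _; simp)]
    congr 2
    rw [Nat.add_comm 1 k, List.replicate_succ]
    rfl
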